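-- pv_equiv track=rewrite | github.com/brianlagranda/Pygame-Project1 | TPencolumnadas/funcionesVACIAS.py | Puntos
-- ===== SOURCE A (Python) =====
-- def Puntos(candidata):
--     #devuelve el puntaje que le corresponde a candidata
--     vocales="aeiou"
--     consdif="jkqwxyz"
--     puntos=0
--     for letra in candidata:
--         if letra != " ":
--             if letra in vocales:
--                 puntos+=1
--             elif letra in consdif:
--                 puntos+=5
--             else:
--                 puntos+=2
--     return puntos
-- ===== SOURCE B (Python) =====
-- def Puntos(candidata):
--     # Closed form: every non-space char is worth 2, vowels adjust by -1, special consonants by +3.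
--     nonspace = sum(1 for c in candidata if c != " ")
--     vowels = sum(1 for c in candidata if c in "aeiou")
--     special = sum(1 for c in candidata if c in "jkqwxyz")
--     return 2 * nonspace - vowels + 3 * special
-- ===== Notes on version B (the rewrite author's own statement) =====
-- stated objective: alternative
-- what changed: Replaces the single per-character branch accumulator with three independent category counts (non-space, vowels, special consonants) combined by the closed form 2*nonspace - vowels + 3*special.
import Mathlib
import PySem

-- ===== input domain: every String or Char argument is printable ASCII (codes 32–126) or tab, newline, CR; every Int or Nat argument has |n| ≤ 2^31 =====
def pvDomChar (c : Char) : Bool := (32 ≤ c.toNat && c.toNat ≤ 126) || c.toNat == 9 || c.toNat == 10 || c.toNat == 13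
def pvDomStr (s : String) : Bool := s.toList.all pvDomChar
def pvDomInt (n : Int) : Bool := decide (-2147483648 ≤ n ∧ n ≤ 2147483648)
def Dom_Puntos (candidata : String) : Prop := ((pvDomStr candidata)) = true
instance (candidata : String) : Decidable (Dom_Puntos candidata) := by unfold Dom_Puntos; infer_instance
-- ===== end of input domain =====

-- B replaces A's per-character branching accumulator by three category counts combined in a closed form; alternative decomposition, same cost.


-- ===== PORT A =====
-- literal port: one pass, branch per character, accumulator `puntos`
def Puntos (candidata : String) : Int :=
  candidata.toList.foldl
    (fun puntos letra =>
      if letra ≠ ' ' then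
        if letra ∈ "aeiou".toList then puntos + 1
        else if letra ∈ "jkqwxyz".toList then puntos + 5
        else puntos + 2
      else puntos)
    0

-- ===== PORT B =====
-- three generator-expression counts, then the closed form 2*nonspace - vowels + 3*special
def Puntos_alt (candidata : String) : Int :=
  let nonspace : Int := candidata.toList.countP (fun c => c ≠ ' ')
  let vowels   : Int := candidata.toList.countP (fun c => c ∈ "aeiou".toList)
  let special  : Int := candidata.toList.countP (fun c => c ∈ "jkqwxyz".toList)
  2 * nonspace - vowels + 3 * special

-- ===== PRECONDITION & SPEC =====
def Spec_Puntos (candidata : String) (out : Int) : Prop := out = Puntos_alt candidata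
instance (candidata : String) (out : Int) : Decidable (Spec_Puntos candidata out) := by unfold Spec_Puntos; infer_instance

-- ===== CLAIM (what is proved, stated in full; the proofs are below) =====
def Claim_equal_Puntos : Prop := ∀ (candidata : String), Dom_Puntos candidata → Spec_Puntos candidata (Puntos candidata)

-- ===== LEMMAS AND PROOFS =====
theorem pv_fold_eq (l : List Char) (a : Int) :
    l.foldl
      (fun puntos letra =>
        if letra ≠ ' ' then
          if letra ∈ "aeiou".toList then puntos + 1
          else if letra ∈ "jkqwxyz".toList then puntos + 5
          else puntos + 2
        else puntos) a
    = a + 2 * (l.countP (fun c => c ≠ ' ') : Int)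
        - (l.countP (fun c => c ∈ "aeiou".toList) : Int)
        + 3 * (l.countP (fun c => c ∈ "jkqwxyz".toList) : Int) := by
  induction l generalizing a with
  | nil => simp
  | cons c t ih =>
    simp only [List.foldl_cons, List.countP_cons, ih]
    by_cases hs : c = ' '
    · subst hs; simp
    · by_cases hv : c ∈ "aeiou".toList
      · have hc : c ∉ "jkqwxyz".toList := by fin_cases hv <;> decide
        simp only [ne_eq, hs, not_false_eq_true, if_true, hv, if_pos, hc, if_neg,
          decide_true, decide_false, decide_not]
        push_cast
        ring
      · by_cases hc : c ∈ "jkqwxyz".toList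
        · simp only [ne_eq, hs, not_false_eq_true, if_true, hv, if_neg, hc, if_pos,
            decide_true, decide_false, decide_not]
          push_cast; ring
        · simp only [ne_eq, hs, not_false_eq_true, if_true, hv, hc, if_neg,
            decide_true, decide_false, decide_not]
          push_cast; ring

-- ===== VERDICT (by name: the statement is the Claim_ definition above) =====
theorem Puntos_spec : Claim_equal_Puntos := by
  intro s _
  unfold Spec_Puntos Puntos Puntos_alt
  simpa using pv_fold_eq s.toList 0
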